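-- pv_equiv track=rewrite | github.com/donaldfilimon/abi | zig-abi-plugin/skills/abi-code-review/scripts/review_prep.py | recommend_commands
-- ===== SOURCE A (Python) =====
-- def recommend_commands(paths: list[str]) -> list[dict[str, str]]:
--     if not paths:
--         return []
--
--     recommended: list[dict[str, str]] = []
--     seen: set[str] = set()
--
--     def add(command: str, reason: str) -> None:
--         if command in seen:
--             return
--         seen.add(command)
--         recommended.append({"command": command, "reason": reason})
--
--     add("zig build full-check", "ABI default pre-close gate for non-trivial changes.")
--     add(
--         "zig build verify-all",
--         "ABI release-style umbrella gate; run on a host where the toolchain links.",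
--     )
--
--     if any(
--         path.startswith("tools/cli/") or path == "docs/data/commands.zon"
--         for path in paths
--     ):
--         add(
--             "zig build cli-tests",
--             "CLI files changed; cover command parsing and help/output behavior.",
--         )
--         add(
--             "zig build refresh-cli-registry",
--             "CLI metadata or command files changed; refresh the generated registry snapshot.",
--         )
--         add(
--             "zig build check-cli-registry",
--             "CLI metadata or command files changed; verify the registry snapshot stayed in sync.",
--         )
--
--     if any(
--         path.startswith("tools/cli/terminal/") or path.endswith("tui_tests_root.zig")
--         for path in paths
--     ):
--         add(
--             "zig build tui-tests",
--             "TUI files changed; cover panels, dashboard logic, and terminal behavior.",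
--         )
--
--     if any(
--         path.startswith("tools/gendocs/")
--         or path.startswith("docs/")
--         or path in {"README.md", "CLAUDE.md"}
--         for path in paths
--     ):
--         add(
--             "zig build check-docs",
--             "Docs or docs-generation files changed; catch drift in generated references.",
--         )
--
--     if any(
--         path.startswith("src/core/database/")
--         or path.startswith("src/features/database/")
--         for path in paths
--     ):
--         add(
--             "zig build wdbx-fast-tests",
--             "WDBX or database paths changed; run the focused database gate.",
--         )
--
--     if any(
--         path in {"build/options.zig", "build/flags.zig", "src/core/feature_catalog.zig"}
--         or path.startswith("src/features/")
--         and path.endswith(("mod.zig", "stub.zig"))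
--         for path in paths
--     ):
--         add(
--             "zig build validate-flags",
--             "Feature surfaces or build flag wiring changed; verify disabled-build compatibility.",
--         )
--
--     return recommended
-- ===== SOURCE B (Python) =====
-- def recommend_commands(paths: list[str]) -> list[dict[str, str]]:
--     if not paths:
--         return []
--
--     cli = tui = docs = db = flags = False
--     for path in paths:
--         cli = cli or path.startswith("tools/cli/") or path == "docs/data/commands.zon"
--         tui = tui or path.startswith("tools/cli/terminal/") or path.endswith("tui_tests_root.zig")
--         docs = docs or path.startswith("tools/gendocs/") or path.startswith("docs/") or path in {"README.md", "CLAUDE.md"}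
--         db = db or path.startswith("src/core/database/") or path.startswith("src/features/database/")
--         flags = flags or path in {"build/options.zig", "build/flags.zig", "src/core/feature_catalog.zig"} or path.startswith("src/features/") and path.endswith(("mod.zig", "stub.zig"))
--
--     recommended = [
--         {"command": "zig build full-check",
--          "reason": "ABI default pre-close gate for non-trivial changes."},
--         {"command": "zig build verify-all",
--          "reason": "ABI release-style umbrella gate; run on a host where the toolchain links."},
--     ]
--     if cli:
--         recommended.append({"command": "zig build cli-tests",
--                             "reason": "CLI files changed; cover command parsing and help/output behavior."})
--         recommended.append({"command": "zig build refresh-cli-registry",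
--                             "reason": "CLI metadata or command files changed; refresh the generated registry snapshot."})
--         recommended.append({"command": "zig build check-cli-registry",
--                             "reason": "CLI metadata or command files changed; verify the registry snapshot stayed in sync."})
--     if tui:
--         recommended.append({"command": "zig build tui-tests",
--                             "reason": "TUI files changed; cover panels, dashboard logic, and terminal behavior."})
--     if docs:
--         recommended.append({"command": "zig build check-docs",
--                             "reason": "Docs or docs-generation files changed; catch drift in generated references."})
--     if db:
--         recommended.append({"command": "zig build wdbx-fast-tests",
--                             "reason": "WDBX or database paths changed; run the focused database gate."})
--     if flags:
--         recommended.append({"command": "zig build validate-flags",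
--                             "reason": "Feature surfaces or build flag wiring changed; verify disabled-build compatibility."})
--     return recommended
-- ===== Notes on version B (the rewrite author's own statement) =====
-- stated objective: simpler
-- what changed: One pass over paths sets five booleans (instead of six separate any(...) rescans plus an add/seen-set machinery), then the command dicts are emitted in the fixed order guarded by those flags; the seen set is dropped since all commands are distinct.
import Mathlib
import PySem

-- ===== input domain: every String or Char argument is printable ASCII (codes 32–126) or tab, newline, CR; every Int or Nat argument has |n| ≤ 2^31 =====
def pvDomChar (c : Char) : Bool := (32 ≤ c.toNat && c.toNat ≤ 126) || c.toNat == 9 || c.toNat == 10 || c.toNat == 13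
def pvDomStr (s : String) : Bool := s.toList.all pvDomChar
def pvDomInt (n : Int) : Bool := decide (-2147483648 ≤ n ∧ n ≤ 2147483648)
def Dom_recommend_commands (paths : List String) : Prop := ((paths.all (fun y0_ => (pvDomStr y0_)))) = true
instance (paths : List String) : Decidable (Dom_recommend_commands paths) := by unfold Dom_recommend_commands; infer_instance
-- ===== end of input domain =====

-- B replaces A's six any(...) rescans and add/seen machinery with one pass that sets five
-- booleans, then emits the command dicts in the fixed order guarded by those flags (simpler).

-- ===== PORT A =====
-- the inner `add` helper: skip if command already seen, else append dict and record command
def pvAdd (st : List (List (String × String)) × PySem.Set String)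
    (command reason : String) : List (List (String × String)) × PySem.Set String :=
  if PySem.Set.contains st.2 command then st
  else (st.1 ++ [[("command", command), ("reason", reason)]], PySem.Set.add st.2 command)

def recommend_commands (paths : List String) : List (List (String × String)) :=
  if paths.isEmpty then []
  else
    let st : List (List (String × String)) × PySem.Set String := ([], PySem.Set.empty)
    let st := pvAdd st "zig build full-check" "ABI default pre-close gate for non-trivial changes."
    let st := pvAdd st "zig build verify-all" "ABI release-style umbrella gate; run on a host where the toolchain links."
    let st :=
      if paths.any (fun path => PySem.Str.startswith path "tools/cli/" || path == "docs/data/commands.zon") then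
        pvAdd (pvAdd (pvAdd st
          "zig build cli-tests" "CLI files changed; cover command parsing and help/output behavior.")
          "zig build refresh-cli-registry" "CLI metadata or command files changed; refresh the generated registry snapshot.")
          "zig build check-cli-registry" "CLI metadata or command files changed; verify the registry snapshot stayed in sync."
      else st
    let st :=
      if paths.any (fun path => PySem.Str.startswith path "tools/cli/terminal/" || PySem.Str.endswith path "tui_tests_root.zig") then
        pvAdd st "zig build tui-tests" "TUI files changed; cover panels, dashboard logic, and terminal behavior."
      else st
    let st :=
      if paths.any (fun path => PySem.Str.startswith path "tools/gendocs/" || PySem.Str.startswith path "docs/" || path == "README.md" || path == "CLAUDE.md") then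
        pvAdd st "zig build check-docs" "Docs or docs-generation files changed; catch drift in generated references."
      else st
    let st :=
      if paths.any (fun path => PySem.Str.startswith path "src/core/database/" || PySem.Str.startswith path "src/features/database/") then
        pvAdd st "zig build wdbx-fast-tests" "WDBX or database paths changed; run the focused database gate."
      else st
    let st :=
      if paths.any (fun path => path == "build/options.zig" || path == "build/flags.zig" || path == "src/core/feature_catalog.zig" || (PySem.Str.startswith path "src/features/" && (PySem.Str.endswith path "mod.zig" || PySem.Str.endswith path "stub.zig"))) then
        pvAdd st "zig build validate-flags" "Feature surfaces or build flag wiring changed; verify disabled-build compatibility."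
      else st
    st.1

-- ===== PORT B =====
-- one pass: fold the five booleans (cli, tui, docs, db, flags) over paths
def pvStep (st : Bool × Bool × Bool × Bool × Bool) (path : String) : Bool × Bool × Bool × Bool × Bool :=
  (st.1 || PySem.Str.startswith path "tools/cli/" || path == "docs/data/commands.zon",
   st.2.1 || PySem.Str.startswith path "tools/cli/terminal/" || PySem.Str.endswith path "tui_tests_root.zig",
   st.2.2.1 || PySem.Str.startswith path "tools/gendocs/" || PySem.Str.startswith path "docs/" || path == "README.md" || path == "CLAUDE.md",
   st.2.2.2.1 || PySem.Str.startswith path "src/core/database/" || PySem.Str.startswith path "src/features/database/",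
   st.2.2.2.2 || path == "build/options.zig" || path == "build/flags.zig" || path == "src/core/feature_catalog.zig" || (PySem.Str.startswith path "src/features/" && (PySem.Str.endswith path "mod.zig" || PySem.Str.endswith path "stub.zig")))

def recommend_commands_alt (paths : List String) : List (List (String × String)) :=
  if paths.isEmpty then []
  else
    let fl := paths.foldl pvStep (false, false, false, false, false)
    [[("command", "zig build full-check"), ("reason", "ABI default pre-close gate for non-trivial changes.")],
     [("command", "zig build verify-all"), ("reason", "ABI release-style umbrella gate; run on a host where the toolchain links.")]]
    ++ (if fl.1 then
          [[("command", "zig build cli-tests"), ("reason", "CLI files changed; cover command parsing and help/output behavior.")],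
           [("command", "zig build refresh-cli-registry"), ("reason", "CLI metadata or command files changed; refresh the generated registry snapshot.")],
           [("command", "zig build check-cli-registry"), ("reason", "CLI metadata or command files changed; verify the registry snapshot stayed in sync.")]]
        else [])
    ++ (if fl.2.1 then
          [[("command", "zig build tui-tests"), ("reason", "TUI files changed; cover panels, dashboard logic, and terminal behavior.")]]
        else [])
    ++ (if fl.2.2.1 then
          [[("command", "zig build check-docs"), ("reason", "Docs or docs-generation files changed; catch drift in generated references.")]]
        else [])
    ++ (if fl.2.2.2.1 then
          [[("command", "zig build wdbx-fast-tests"), ("reason", "WDBX or database paths changed; run the focused database gate.")]]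
        else [])
    ++ (if fl.2.2.2.2 then
          [[("command", "zig build validate-flags"), ("reason", "Feature surfaces or build flag wiring changed; verify disabled-build compatibility.")]]
        else [])

-- ===== PRECONDITION & SPEC =====
def Spec_recommend_commands (paths : List String) (out : List (List (String × String))) : Prop := out = recommend_commands_alt paths
instance (paths : List String) (out : List (List (String × String))) : Decidable (Spec_recommend_commands paths out) := by unfold Spec_recommend_commands; infer_instance

-- ===== CLAIM (what is proved, stated in full; the proofs are below) =====
def Claim_equal_recommend_commands : Prop := ∀ (paths : List String), Dom_recommend_commands paths → Spec_recommend_commands paths (recommend_commands paths)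

-- ===== LEMMAS AND PROOFS =====

-- the fold of pvStep computes the five any's componentwise
theorem pvStep_foldl (paths : List String) (st : Bool × Bool × Bool × Bool × Bool) :
    paths.foldl pvStep st =
      (st.1 || paths.any (fun path => PySem.Str.startswith path "tools/cli/" || path == "docs/data/commands.zon"),
       st.2.1 || paths.any (fun path => PySem.Str.startswith path "tools/cli/terminal/" || PySem.Str.endswith path "tui_tests_root.zig"),
       st.2.2.1 || paths.any (fun path => PySem.Str.startswith path "tools/gendocs/" || PySem.Str.startswith path "docs/" || path == "README.md" || path == "CLAUDE.md"),
       st.2.2.2.1 || paths.any (fun path => PySem.Str.startswith path "src/core/database/" || PySem.Str.startswith path "src/features/database/"),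
       st.2.2.2.2 || paths.any (fun path => path == "build/options.zig" || path == "build/flags.zig" || path == "src/core/feature_catalog.zig" || (PySem.Str.startswith path "src/features/" && (PySem.Str.endswith path "mod.zig" || PySem.Str.endswith path "stub.zig")))) := by
  induction paths generalizing st with
  | nil => simp
  | cons h t ih =>
      simp only [List.foldl_cons, List.any_cons, ih, pvStep]
      simp [Bool.or_assoc]

-- ===== VERDICT (by name: the statement is the Claim_ definition above) =====
theorem recommend_commands_spec : Claim_equal_recommend_commands := by
  intro paths _
  unfold Spec_recommend_commands recommend_commands recommend_commands_alt
  by_cases hE : paths.isEmpty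
  · simp [hE]
  · simp only [hE, pvStep_foldl, Bool.false_or]
    cases h1 : paths.any (fun path => PySem.Str.startswith path "tools/cli/" || path == "docs/data/commands.zon") <;>
    cases h2 : paths.any (fun path => PySem.Str.startswith path "tools/cli/terminal/" || PySem.Str.endswith path "tui_tests_root.zig") <;>
    cases h3 : paths.any (fun path => PySem.Str.startswith path "tools/gendocs/" || PySem.Str.startswith path "docs/" || path == "README.md" || path == "CLAUDE.md") <;>
    cases h4 : paths.any (fun path => PySem.Str.startswith path "src/core/database/" || PySem.Str.startswith path "src/features/database/") <;>
    cases h5 : paths.any (fun path => path == "build/options.zig" || path == "build/flags.zig" || path == "src/core/feature_catalog.zig" || (PySem.Str.startswith path "src/features/" && (PySem.Str.endswith path "mod.zig" || PySem.Str.endswith path "stub.zig"))) <;>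
    rfl
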